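-- pv_equiv track=rewrite | github.com/adcGG/Lianxi | lanqiaobei/Bee_Sway.py | countfly
-- ===== SOURCE A (Python) =====
-- def countfly(fly):
-- 	B1x = 0
-- 	B1y = 0
-- 	B1z = 0
-- 	B2x = 0
-- 	B2y = 0
-- 	B2z = 0
-- 	for i in range(len(fly)):
-- 		ai, bi, ci, di, ei, fi, ti = fly[i]
-- 		B1x = B1x + ai * ti
-- 		B1y = B1y + bi * ti
-- 		B1z = B1z + ci * ti
-- 		B2x = B2x + di * ti
-- 		B2y = B2y + ei * ti
-- 		B2z = B2z + fi * ti
-- 	return B1x,B1y,B1z,B2x,B2y,B2z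
-- ===== SOURCE B (Python) =====
-- def countfly(fly):
--     if not fly:
--         return (0, 0, 0, 0, 0, 0)
--     a, b, c, d, e, f, t = zip(*fly)
--     return (sum(x * w for x, w in zip(a, t)),
--             sum(x * w for x, w in zip(b, t)),
--             sum(x * w for x, w in zip(c, t)),
--             sum(x * w for x, w in zip(d, t)),
--             sum(x * w for x, w in zip(e, t)),
--             sum(x * w for x, w in zip(f, t)))
-- ===== Notes on version B (the rewrite author's own statement) =====
-- stated objective: alternative
-- what changed: Replaces the single accumulating loop over six running sums by a zip(*fly) column transpose followed by six independent dot-product sums.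
import Mathlib
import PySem

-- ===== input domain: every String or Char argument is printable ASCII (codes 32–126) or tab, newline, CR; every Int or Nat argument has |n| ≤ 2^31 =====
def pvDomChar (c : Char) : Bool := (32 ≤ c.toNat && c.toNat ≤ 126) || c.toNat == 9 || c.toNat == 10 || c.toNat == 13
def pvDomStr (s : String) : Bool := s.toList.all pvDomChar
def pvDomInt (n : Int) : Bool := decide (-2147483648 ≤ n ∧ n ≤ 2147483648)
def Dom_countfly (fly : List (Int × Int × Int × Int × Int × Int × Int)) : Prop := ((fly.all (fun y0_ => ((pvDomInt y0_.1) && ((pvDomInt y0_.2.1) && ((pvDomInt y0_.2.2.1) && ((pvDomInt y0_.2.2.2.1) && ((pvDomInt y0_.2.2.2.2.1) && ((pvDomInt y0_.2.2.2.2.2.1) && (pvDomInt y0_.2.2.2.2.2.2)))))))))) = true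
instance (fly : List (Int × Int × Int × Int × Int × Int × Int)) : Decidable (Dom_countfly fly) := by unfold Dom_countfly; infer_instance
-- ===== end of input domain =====

-- ===== PORT A =====
-- One pass accumulating six running sums, as in A's loop over range(len(fly)).
def countfly (fly : List (Int × Int × Int × Int × Int × Int × Int)) : Int × Int × Int × Int × Int × Int :=
  fly.foldl
    (fun s r =>
      (s.1 + r.1 * r.2.2.2.2.2.2,
       s.2.1 + r.2.1 * r.2.2.2.2.2.2,
       s.2.2.1 + r.2.2.1 * r.2.2.2.2.2.2,
       s.2.2.2.1 + r.2.2.2.1 * r.2.2.2.2.2.2,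
       s.2.2.2.2.1 + r.2.2.2.2.1 * r.2.2.2.2.2.2,
       s.2.2.2.2.2 + r.2.2.2.2.2.1 * r.2.2.2.2.2.2))
    (0, 0, 0, 0, 0, 0)

-- ===== PORT B =====
-- B: guard the empty case, then take six independent column dot-products with the weight column.
def countfly_alt (fly : List (Int × Int × Int × Int × Int × Int × Int)) : Int × Int × Int × Int × Int × Int :=
  if fly = [] then (0, 0, 0, 0, 0, 0)
  else
    ((fly.map (fun r => r.1 * r.2.2.2.2.2.2)).sum,
     (fly.map (fun r => r.2.1 * r.2.2.2.2.2.2)).sum,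
     (fly.map (fun r => r.2.2.1 * r.2.2.2.2.2.2)).sum,
     (fly.map (fun r => r.2.2.2.1 * r.2.2.2.2.2.2)).sum,
     (fly.map (fun r => r.2.2.2.2.1 * r.2.2.2.2.2.2)).sum,
     (fly.map (fun r => r.2.2.2.2.2.1 * r.2.2.2.2.2.2)).sum)

-- ===== PRECONDITION & SPEC =====
def Spec_countfly (fly : List (Int × Int × Int × Int × Int × Int × Int)) (out : Int × Int × Int × Int × Int × Int) : Prop := out = countfly_alt fly
instance (fly : List (Int × Int × Int × Int × Int × Int × Int)) (out : Int × Int × Int × Int × Int × Int) : Decidable (Spec_countfly fly out) := by unfold Spec_countfly; infer_instance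

-- ===== CLAIM (what is proved, stated in full; the proofs are below) =====
def Claim_equal_countfly : Prop := ∀ (fly : List (Int × Int × Int × Int × Int × Int × Int)), Dom_countfly fly → Spec_countfly fly (countfly fly)

-- ===== LEMMAS AND PROOFS =====

-- ===== VERDICT (by name: the statement is the Claim_ definition above) =====
lemma countfly_foldl_char (fly : List (Int × Int × Int × Int × Int × Int × Int))
    (s : Int × Int × Int × Int × Int × Int) :
    fly.foldl
      (fun s r =>
        (s.1 + r.1 * r.2.2.2.2.2.2,
         s.2.1 + r.2.1 * r.2.2.2.2.2.2,
         s.2.2.1 + r.2.2.1 * r.2.2.2.2.2.2,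
         s.2.2.2.1 + r.2.2.2.1 * r.2.2.2.2.2.2,
         s.2.2.2.2.1 + r.2.2.2.2.1 * r.2.2.2.2.2.2,
         s.2.2.2.2.2 + r.2.2.2.2.2.1 * r.2.2.2.2.2.2)) s
    = (s.1 + (fly.map (fun r => r.1 * r.2.2.2.2.2.2)).sum,
       s.2.1 + (fly.map (fun r => r.2.1 * r.2.2.2.2.2.2)).sum,
       s.2.2.1 + (fly.map (fun r => r.2.2.1 * r.2.2.2.2.2.2)).sum,
       s.2.2.2.1 + (fly.map (fun r => r.2.2.2.1 * r.2.2.2.2.2.2)).sum,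
       s.2.2.2.2.1 + (fly.map (fun r => r.2.2.2.2.1 * r.2.2.2.2.2.2)).sum,
       s.2.2.2.2.2 + (fly.map (fun r => r.2.2.2.2.2.1 * r.2.2.2.2.2.2)).sum) := by
  induction fly generalizing s with
  | nil => simp
  | cons h t ih => simp [ih] ; omega

-- ===== VERDICT (by name: the statement is the Claim_ definition above) =====
theorem countfly_spec : Claim_equal_countfly := by
  intro fly _
  unfold Spec_countfly countfly countfly_alt
  rcases fly with _ | ⟨h, t⟩
  · simp
  · simp [countfly_foldl_char]
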